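-- pv_equiv track=rewrite | github.com/rheard/ProjectEuler | ProjectEuler/p145.py | reversible
-- ===== SOURCE A (Python) =====
-- def reversible(start, end):
--     count = 0
--     for n in range(start, end):
--         reverse_n = str(n)[::-1]
--         if reverse_n[0] == '0':
--             # 90 is not a reversible number by problem definition even though 90 + 9 = 99
--             continue
--
--         this_sum = str(n + int(reverse_n))
--         for c in this_sum:
--             if c in '02468':
--                 break
--         else:
--             count += 1
--     return count
-- ===== SOURCE B (Python) =====
-- def reversible(start, end):
--     # Block decomposition: walk tens-blocks n = 10*p + d (d = 1..9; d = 0 can never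
--     # be reversible), share the reversed prefix str(p)[::-1] across the whole block,
--     # and test the all-odd-digits property of the sum by integer arithmetic.
--     count = 0
--     for p in range(start // 10, (end + 9) // 10):
--         rp = str(p)[::-1] if p else ''
--         for d in range(1, 10):
--             n = 10 * p + d
--             if n < start or n >= end:
--                 continue
--             s = n + int(str(d) + rp)
--             while s > 0 and s % 2 == 1:
--                 s //= 10
--             if s == 0:
--                 count += 1
--     return count
-- ===== Notes on version B (the rewrite author's own statement) =====
-- stated objective: alternative
-- what changed: B replaces A's flat scan (per-number string reversal, '0'-head skip, and character scan of str(n+rev) for an even digit) by a tens-block decomposition: it iterates over prefixes p, computes the reversed prefix str(p)[::-1] once per block of ten, enumerates only last digits d=1..9 (no divisibility/'0'-head test), builds the candidate's reverse by concatenating str(d) with the shared reversed prefix, and checks that all digits of the sum are odd by integer parity/floor-division arithmetic instead of string membership.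
import Mathlib
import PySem

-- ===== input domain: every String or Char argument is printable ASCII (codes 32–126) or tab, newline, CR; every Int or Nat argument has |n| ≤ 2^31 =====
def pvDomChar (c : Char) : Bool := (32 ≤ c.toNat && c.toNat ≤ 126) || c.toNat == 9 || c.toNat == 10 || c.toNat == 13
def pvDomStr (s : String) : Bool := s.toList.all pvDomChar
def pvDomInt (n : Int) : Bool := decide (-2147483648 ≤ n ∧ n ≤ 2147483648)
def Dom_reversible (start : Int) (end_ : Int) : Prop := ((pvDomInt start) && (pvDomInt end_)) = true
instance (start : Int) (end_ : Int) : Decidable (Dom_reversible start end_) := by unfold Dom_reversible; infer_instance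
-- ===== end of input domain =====

-- B restructures A's flat scan into a tens-block decomposition (reversed prefix shared per
-- block, last digits 1..9 enumerated, sum digits checked arithmetically); objective: alternative.

-- ===== PORT A =====
-- inner 'for c in this_sum: if c in '02468': break / else:' — true = an even digit was found (break taken)
def pvScanEven : List Char → Bool
  | [] => false
  | c :: cs => if c ∈ (['0', '2', '4', '6', '8'] : List Char) then true else pvScanEven cs

def reversible (start : Int) (end_ : Int) : Int :=
  (PySem.List.pyRange start end_ 1).foldl (fun count n =>
    -- reverse_n = str(n)[::-1]  (strings as List Char; slice? with step -1 is always some)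
    let reverse_n : List Char := (PySem.List.slice? (PySem.Int.toChars n) none none (-1)).getD []
    -- reverse_n[0] == '0'  (IndexError impossible: str(n) is nonempty)
    if (PySem.List.pyGet? reverse_n 0).getD ' ' = '0' then count
    else
      -- this_sum = str(n + int(reverse_n))  (ValueError of int() = none, excluded by Pre_)
      let this_sum := PySem.Int.toChars (n + (PySem.Int.ofChars? reverse_n).getD 0)
      if pvScanEven this_sum then count else count + 1) 0

-- ===== PORT B =====
-- 'while s > 0 and s % 2 == 1: s //= 10' of Source B, returning the final s
def pvOddScan (s : Int) : Int :=
  if h : 0 < s ∧ PySem.Int.mod s 2 = 1 then pvOddScan (PySem.Int.floordiv s 10) else s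
termination_by s.toNat
decreasing_by
  have h10 : PySem.Int.floordiv s 10 < s := by
    rw [PySem.Int.floordiv_lt_iff_lt_mul (by norm_num : (0:Int) < 10)]
    nlinarith [h.1]
  exact (Int.toNat_lt_toNat h.1).2 h10

def reversible_alt (start : Int) (end_ : Int) : Int :=
  (PySem.List.pyRange (PySem.Int.floordiv start 10) (PySem.Int.floordiv (end_ + 9) 10) 1).foldl
    (fun count p =>
      -- rp = str(p)[::-1] if p else ''
      let rp : List Char := if p ≠ 0 then (PySem.List.slice? (PySem.Int.toChars p) none none (-1)).getD [] else []
      (PySem.List.pyRange 1 10 1).foldl (fun count d =>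
        let n := 10 * p + d
        if n < start ∨ end_ ≤ n then count
        else
          -- s = n + int(str(d) + rp)
          let s := n + (PySem.Int.ofChars? (PySem.Int.toChars d ++ rp)).getD 0
          if pvOddScan s = 0 then count + 1 else count) count) 0

-- ===== PRECONDITION & SPEC =====
-- Pre_ excludes exactly the ranges on which A raises ValueError: any range containing a negative
-- n whose reversed decimal string ends in '-' reaches int() and raises; the only surviving ranges
-- with a negative element are singletons {start} with 10 | start (the reversed string then starts
-- with '0' and the iteration is skipped).
def Pre_reversible (start : Int) (end_ : Int) : Prop :=
  0 ≤ start ∨ end_ ≤ start ∨ (end_ = start + 1 ∧ (10 : Int) ∣ start)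
instance (start : Int) (end_ : Int) : Decidable (Pre_reversible start end_) := by
  unfold Pre_reversible; infer_instance
def pvWitness_reversible : Int × Int := (0, 30)
def Spec_reversible (start : Int) (end_ : Int) (out : Int) : Prop := out = reversible_alt start end_
instance (start : Int) (end_ : Int) (out : Int) : Decidable (Spec_reversible start end_ out) := by
  unfold Spec_reversible; infer_instance

-- ===== CLAIM (what is proved, stated in full; the proofs are below) =====
def Claim_equal_reversible : Prop := ∀ (start : Int) (end_ : Int), Dom_reversible start end_ → Pre_reversible start end_ → Spec_reversible start end_ (reversible start end_)

-- ===== LEMMAS AND PROOFS =====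

-- reversed-string value parsed by A, and the per-number predicates both programs decide
def pvRevVal (n : Int) : Int := (PySem.Int.ofChars? (PySem.Int.toChars n).reverse).getD 0

def pvGoodA (n : Int) : Bool :=
  !(decide (PySem.Int.mod n 10 = 0)) && decide (pvOddScan (n + pvRevVal n) = 0)

def pvPredB (start end_ p d : Int) : Bool :=
  !(decide (10 * p + d < start ∨ end_ ≤ 10 * p + d)) &&
    decide (pvOddScan (10 * p + d +
      (PySem.Int.ofChars? (PySem.Int.toChars d ++
        (if p ≠ 0 then (PySem.Int.toChars p).reverse else []))).getD 0) = 0)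

theorem toDigits10_ne_nil (m : Nat) : Nat.toDigits 10 m ≠ [] := by
  rw [Nat.toDigits_eq_if (by norm_num)]
  split <;> simp

theorem toDigits10_getLast? (m : Nat) :
    (Nat.toDigits 10 m).getLast? = some (Nat.digitChar (m % 10)) := by
  rw [Nat.toDigits_eq_if (by norm_num)]
  split
  · rename_i h
    rw [Nat.mod_eq_of_lt h]
    rfl
  · simp

theorem toDigits10_mem (m : Nat) : ∀ c ∈ Nat.toDigits 10 m, ∃ d, d < 10 ∧ c = Nat.digitChar d := by
  induction m using Nat.strong_induction_on with
  | _ m ih =>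
    intro c hc
    rw [Nat.toDigits_eq_if (by norm_num)] at hc
    split at hc
    · rename_i h
      simp at hc
      exact ⟨m, h, hc⟩
    · rename_i h
      rcases List.mem_append.1 hc with h1 | h2
      · exact ih (m / 10) (Nat.div_lt_self (by omega) (by norm_num)) c h1
      · simp at h2
        exact ⟨m % 10, Nat.mod_lt _ (by norm_num), h2⟩

theorem digitChar_eq_zero_iff (d : Nat) (hd : d < 10) : Nat.digitChar d = '0' ↔ d = 0 := by
  interval_cases d <;> simp [Nat.digitChar]

theorem digitChar_mem_evens_iff (d : Nat) (hd : d < 10) :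
    Nat.digitChar d ∈ (['0', '2', '4', '6', '8'] : List Char) ↔ d % 2 = 0 := by
  interval_cases d <;> simp [Nat.digitChar]

theorem digitChar_not_space (d : Nat) (hd : d < 10) :
    PySem.Int.isIntSpace (Nat.digitChar d) = false := by
  interval_cases d <;> simp [Nat.digitChar, PySem.Int.isIntSpace]

theorem pvScanEven_eq_any (cs : List Char) :
    pvScanEven cs = cs.any (fun c => decide (c ∈ (['0', '2', '4', '6', '8'] : List Char))) := by
  induction cs with
  | nil => rfl
  | cons c cs ih =>
    by_cases h : c ∈ (['0', '2', '4', '6', '8'] : List Char) <;>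
      simp [pvScanEven, h, ih] <;> simp at h <;> tauto

theorem floordiv_natCast10 (m : Nat) : PySem.Int.floordiv (m : Int) 10 = ((m / 10 : Nat) : Int) := by
  rw [PySem.Int.floordiv_eq_ediv_of_pos (by norm_num)]
  norm_num

theorem mod_natCast2 (m : Nat) : PySem.Int.mod (m : Int) 2 = ((m % 2 : Nat) : Int) := by
  rw [PySem.Int.mod_eq_emod_of_pos (by norm_num)]
  norm_num

theorem mod_natCast10 (m : Nat) : PySem.Int.mod (m : Int) 10 = ((m % 10 : Nat) : Int) := by
  rw [PySem.Int.mod_eq_emod_of_pos (by norm_num)]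
  norm_num

theorem pvOddScan_zero : pvOddScan 0 = 0 := by
  rw [pvOddScan]
  simp

theorem pvOddScan_main (m : Nat) (hm : 1 ≤ m) :
    (pvScanEven (Nat.toDigits 10 m) = false ↔ pvOddScan (m : Int) = 0) := by
  induction m using Nat.strong_induction_on with
  | _ m ih =>
    rw [pvScanEven_eq_any, Nat.toDigits_eq_if (by norm_num), pvOddScan, mod_natCast2,
      floordiv_natCast10]
    by_cases hpar : m % 2 = 1
    · rw [dif_pos ⟨by exact_mod_cast hm, by rw [hpar]; norm_num⟩]
      by_cases hlt : m < 10
      · rw [if_pos hlt]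
        have h0 : ((m / 10 : Nat) : Int) = 0 := by
          have h : m / 10 = 0 := by omega
          simp [h]
        rw [h0, pvOddScan_zero]
        simp only [List.any_cons, List.any_nil, Bool.or_false, decide_eq_false_iff_not,
          digitChar_mem_evens_iff m hlt]
        simp only [iff_true]
        omega
      · rw [if_neg hlt]
        have ihd := ih (m / 10) (by omega) (by omega)
        rw [pvScanEven_eq_any] at ihd
        simp only [List.any_append, List.any_cons, List.any_nil, Bool.or_false,
          Bool.or_eq_false_iff, decide_eq_false_iff_not,
          digitChar_mem_evens_iff (m % 10) (by omega)]
        constructor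
        · rintro ⟨h1, -⟩
          exact ihd.1 h1
        · intro h1
          exact ⟨ihd.2 h1, by omega⟩
    · rw [dif_neg (by rintro ⟨-, h2⟩; omega)]
      by_cases hlt : m < 10
      · rw [if_pos hlt]
        simp only [List.any_cons, List.any_nil, Bool.or_false, decide_eq_false_iff_not,
          digitChar_mem_evens_iff m hlt]
        omega
      · rw [if_neg hlt]
        simp only [List.any_append, List.any_cons, List.any_nil, Bool.or_false,
          Bool.or_eq_false_iff, decide_eq_false_iff_not,
          digitChar_mem_evens_iff (m % 10) (by omega)]
        constructor
        · rintro ⟨-, hbad⟩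
          exact absurd (by omega) hbad
        · intro hbad
          exact absurd hbad (by omega)

theorem ofChars?_digits_nonneg (cs : List Char)
    (h : ∀ c ∈ cs, ∃ d, d < 10 ∧ c = Nat.digitChar d) (hne : cs ≠ []) :
    0 ≤ (PySem.Int.ofChars? cs).getD 0 := by
  cases hE : PySem.Int.ofChars? cs with
  | none => simp
  | some v =>
    have hnospace : ∀ c ∈ cs, PySem.Int.isIntSpace c = false := fun c hc => by
      obtain ⟨d, hd, rfl⟩ := h c hc
      exact digitChar_not_space d hd
    have h1 : List.dropWhile PySem.Int.isIntSpace cs = cs := by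
      cases cs with
      | nil => rfl
      | cons a l =>
        rw [List.dropWhile_cons, if_neg]
        simp [hnospace a (by simp)]
    have h2 : List.dropWhile PySem.Int.isIntSpace cs.reverse = cs.reverse := by
      cases hr : cs.reverse with
      | nil => rfl
      | cons a l =>
        rw [List.dropWhile_cons, if_neg]
        have : a ∈ cs := by
          have : a ∈ cs.reverse := by rw [hr]; simp
          simpa using this
        simp [hnospace a this]
    obtain ⟨c, rest, rfl⟩ : ∃ c rest, cs = c :: rest := by
      cases cs with
      | nil => exact absurd rfl hne
      | cons a l => exact ⟨a, l, rfl⟩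
    obtain ⟨d, hd, hc⟩ := h c (by simp)
    simp only [PySem.Int.ofChars?, h1, h2, List.reverse_reverse] at hE
    have hcdash : c ≠ '-' ∧ c ≠ '+' := by
      rw [hc]
      interval_cases d <;> simp [Nat.digitChar]
    split at hE
    · rename_i ds heq
      exact absurd (List.head_eq_of_cons_eq heq) hcdash.1
    · rename_i ds heq
      exact absurd (List.head_eq_of_cons_eq heq) hcdash.2
    · rw [Option.map_eq_some_iff] at hE
      obtain ⟨b, hb, rfl⟩ := hE
      obtain ⟨a, -, ha⟩ := Option.bind_eq_some_iff.1 hb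
      simp only [Option.pure_def, Option.some.injEq] at ha
      simp [← ha]

-- A's loop body, arithmetically, at every n ≥ 0
theorem bodyA_eq (count n : Int) (hn : 0 ≤ n) :
    (let reverse_n : List Char := (PySem.List.slice? (PySem.Int.toChars n) none none (-1)).getD []
     if (PySem.List.pyGet? reverse_n 0).getD ' ' = '0' then count
     else
       let this_sum := PySem.Int.toChars (n + (PySem.Int.ofChars? reverse_n).getD 0)
       if pvScanEven this_sum then count else count + 1) =
    (if pvGoodA n then count + 1 else count) := by
  have htc : PySem.Int.toChars n = Nat.toDigits 10 n.toNat := by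
    rw [PySem.Int.toChars, if_neg (by omega)]
  have hhead : ((Nat.toDigits 10 n.toNat).reverse.head?).getD ' ' = Nat.digitChar (n.toNat % 10) := by
    rw [List.head?_reverse, toDigits10_getLast?, Option.getD_some]
  have hmod : PySem.Int.mod n 10 = ((n.toNat % 10 : Nat) : Int) := by
    rw [← Int.toNat_of_nonneg hn, mod_natCast10]
    simp
  simp only [htc, PySem.List.slice?_none_none_neg_one, Option.getD_some, PySem.List.pyGet?_zero,
    ← List.head?_eq_getElem?, hhead]
  by_cases hz : n.toNat % 10 = 0
  · rw [if_pos ((digitChar_eq_zero_iff _ (Nat.mod_lt _ (by norm_num))).2 hz)]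
    have hg : pvGoodA n = false := by
      have hdvd : (10 : Int) ∣ n := by omega
      simp [pvGoodA, hdvd]
    rw [hg]
    simp
  · rw [if_neg (fun hc => hz ((digitChar_eq_zero_iff _ (Nat.mod_lt _ (by norm_num))).1 hc))]
    have hrevmem : ∀ c ∈ (Nat.toDigits 10 n.toNat).reverse, ∃ d, d < 10 ∧ c = Nat.digitChar d :=
      fun c hc => toDigits10_mem n.toNat c (List.mem_reverse.1 hc)
    have hrevne : (Nat.toDigits 10 n.toNat).reverse ≠ [] := by
      simp [toDigits10_ne_nil n.toNat]
    have hge : 0 ≤ (PySem.Int.ofChars? (Nat.toDigits 10 n.toNat).reverse).getD 0 :=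
      ofChars?_digits_nonneg _ hrevmem hrevne
    have hrv : pvRevVal n = (PySem.Int.ofChars? (Nat.toDigits 10 n.toNat).reverse).getD 0 := by
      rw [pvRevVal, htc]
    have hnd : ¬ (10 : Int) ∣ n := by omega
    set t := n + (PySem.Int.ofChars? (Nat.toDigits 10 n.toNat).reverse).getD 0 with ht
    have hn1 : 1 ≤ n := by
      rcases lt_or_ge n 1 with h1 | h1
      · exfalso
        apply hz
        have hzero : n = 0 := by omega
        simp [hzero]
      · exact h1
    have ht1 : 1 ≤ t := by omega
    have htt : ((t.toNat : Int)) = t := Int.toNat_of_nonneg (by omega)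
    have htct : PySem.Int.toChars t = Nat.toDigits 10 t.toNat := by
      rw [PySem.Int.toChars, if_neg (by omega)]
    have hmain := pvOddScan_main t.toNat (by omega)
    rw [htt] at hmain
    have hgood : pvGoodA n = decide (pvOddScan t = 0) := by
      simp [pvGoodA, hnd, hrv, ← ht]
    rw [htct, hgood]
    rcases hsc : pvScanEven (Nat.toDigits 10 t.toNat) with _ | _
    · rw [if_neg (by simp), if_pos (by simp [hmain.1 hsc])]
    · rw [if_pos rfl, if_neg ?_]
      simp only [decide_eq_true_eq]
      intro hc
      rw [hmain.2 hc] at hsc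
      cases hsc

-- both loop bodies skip a negative multiple of ten (A side)
theorem bodyA_skip_neg (count n : Int) (hn : n < 0) (hdvd : (10 : Int) ∣ n) :
    (let reverse_n : List Char := (PySem.List.slice? (PySem.Int.toChars n) none none (-1)).getD []
     if (PySem.List.pyGet? reverse_n 0).getD ' ' = '0' then count
     else
       let this_sum := PySem.Int.toChars (n + (PySem.Int.ofChars? reverse_n).getD 0)
       if pvScanEven this_sum then count else count + 1) = count := by
  have htc : PySem.Int.toChars n = '-' :: Nat.toDigits 10 n.natAbs := by
    rw [PySem.Int.toChars, if_pos hn]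
  have hzero : n.natAbs % 10 = 0 := by omega
  have hhead : (('-' :: Nat.toDigits 10 n.natAbs).reverse.head?).getD ' ' = '0' := by
    rw [List.reverse_cons, List.head?_append, List.head?_reverse, toDigits10_getLast?, hzero]
    rfl
  simp only [htc, PySem.List.slice?_none_none_neg_one, Option.getD_some, PySem.List.pyGet?_zero,
    ← List.head?_eq_getElem?, hhead]
  simp

theorem A_countP (start end_ : Int) (h : 0 ≤ start) :
    reversible start end_ = ((PySem.List.pyRange start end_ 1).countP pvGoodA : Int) := by
  unfold reversible
  rw [PySem.List.foldl_congr_mem _ _ (fun (count n : Int) => if pvGoodA n then count + 1 else count) 0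
    (fun acc x hx => bodyA_eq acc x (le_trans h (PySem.List.mem_pyRange_one.1 hx).1))]
  rw [PySem.List.foldl_count_if]
  simp

theorem B_sum (start end_ : Int) :
    reversible_alt start end_ =
      (((PySem.List.pyRange (PySem.Int.floordiv start 10) (PySem.Int.floordiv (end_ + 9) 10) 1).map
        (fun p => ((PySem.List.pyRange 1 10 1).countP (pvPredB start end_ p) : Int))).sum) := by
  unfold reversible_alt
  rw [PySem.List.foldl_congr_mem _ _
    (fun (count p : Int) => count + ((PySem.List.pyRange 1 10 1).countP (pvPredB start end_ p) : Int)) 0 ?_]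
  · rw [PySem.List.foldl_add]
    simp
  · intro acc p _
    simp only [PySem.List.slice?_none_none_neg_one, Option.getD_some]
    rw [PySem.List.foldl_congr_mem _ _
      (fun (count d : Int) => if pvPredB start end_ p d then count + 1 else count) acc ?_]
    · rw [PySem.List.foldl_count_if]
    · intro c d _
      by_cases hb : 10 * p + d < start ∨ end_ ≤ 10 * p + d
      · simp [pvPredB, hb]
      · simp [pvPredB, hb]

theorem revchars_block (p d : Int) (hp : 0 ≤ p) (hd1 : 1 ≤ d) (hd9 : d < 10) :
    PySem.Int.toChars d ++ (if p ≠ 0 then (PySem.Int.toChars p).reverse else []) =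
      (PySem.Int.toChars (10 * p + d)).reverse := by
  have htcd : PySem.Int.toChars d = [Nat.digitChar d.toNat] := by
    rw [PySem.Int.toChars, if_neg (by omega), Nat.toDigits_eq_if (by norm_num), if_pos (by omega)]
  by_cases hp0 : p = 0
  · subst hp0
    have h0 : 10 * (0 : Int) + d = d := by ring
    rw [h0, htcd]
    simp
  · have h10 : PySem.Int.toChars (10 * p + d) =
        Nat.toDigits 10 p.toNat ++ [Nat.digitChar d.toNat] := by
      rw [PySem.Int.toChars, if_neg (by omega)]
      have hN : (10 * p + d).toNat = 10 * p.toNat + d.toNat := by omega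
      rw [hN, Nat.toDigits_eq_if (by norm_num), if_neg (by omega)]
      have hdiv : (10 * p.toNat + d.toNat) / 10 = p.toNat := by omega
      have hmodN : (10 * p.toNat + d.toNat) % 10 = d.toNat := by omega
      rw [hdiv, hmodN]
    have htcp : PySem.Int.toChars p = Nat.toDigits 10 p.toNat := by
      rw [PySem.Int.toChars, if_neg (by omega)]
    rw [h10, htcd, htcp, if_pos hp0]
    simp

theorem predB_eq (start end_ p d : Int) (hp : 0 ≤ p) (hd1 : 1 ≤ d) (hd9 : d < 10) :
    pvPredB start end_ p d =
      (pvGoodA (10 * p + d) && (decide (start ≤ 10 * p + d) && decide (10 * p + d < end_))) := by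
  have hstr := revchars_block p d hp hd1 hd9
  by_cases h1 : 10 * p + d < start
  · simp [pvPredB, pvGoodA, h1]
  · by_cases h2 : end_ ≤ 10 * p + d
    · simp [pvPredB, pvGoodA, h2]
    · have hd10 : ¬ (10 : Int) ∣ d := by omega
      simp only [pvPredB, pvGoodA, pvRevVal]
      rw [hstr]
      simp [h1, h2, hd10, not_lt.1 h1, not_le.1 h2]

theorem sum_map_natCast {α : Type} (l : List α) (g : α → Nat) :
    (l.map (fun x => ((g x : Nat) : Int))).sum = (((l.map g).sum : Nat) : Int) := by
  induction l with
  | nil => rfl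
  | cons a l ih => simp [ih]

theorem pairwise_pyRange (a b : Int) : List.Pairwise (· < ·) (PySem.List.pyRange a b 1) := by
  rcases lt_or_ge a b with h | h
  · rw [PySem.List.pyRange_one_cons h]
    refine List.Pairwise.cons ?_ (pairwise_pyRange (a + 1) b)
    intro x hx
    have := PySem.List.mem_pyRange_one.1 hx
    omega
  · rw [PySem.List.pyRange_one_eq_nil h]
    exact .nil
termination_by (b - a).toNat
decreasing_by omega

theorem filter_block_eq (start end_ : Int) (_h : 0 ≤ start) :
    (PySem.List.pyRange start end_ 1).filter (fun n => !decide ((10 : Int) ∣ n)) =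
      ((PySem.List.pyRange (start / 10) ((end_ + 9) / 10) 1).flatMap
        (fun p => (PySem.List.pyRange 1 10 1).map (fun d => 10 * p + d))).filter
        (fun n => decide (start ≤ n) && decide (n < end_)) := by
  have pw1 : List.Pairwise (· < ·)
      ((PySem.List.pyRange start end_ 1).filter (fun n => !decide ((10 : Int) ∣ n))) :=
    (pairwise_pyRange start end_).filter _
  have pwflat : List.Pairwise (· < ·)
      ((PySem.List.pyRange (start / 10) ((end_ + 9) / 10) 1).flatMap
        (fun p => (PySem.List.pyRange 1 10 1).map (fun d => 10 * p + d))) := by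
    rw [List.pairwise_flatMap]
    constructor
    · intro p _
      rw [List.pairwise_map]
      exact (pairwise_pyRange 1 10).imp (by omega)
    · refine (pairwise_pyRange _ _).imp ?_
      intro p1 p2 hlt x hx y hy
      rw [List.mem_map] at hx hy
      obtain ⟨d1, hd1, rfl⟩ := hx
      obtain ⟨d2, hd2, rfl⟩ := hy
      have h1 := PySem.List.mem_pyRange_one.1 hd1
      have h2 := PySem.List.mem_pyRange_one.1 hd2
      omega
  have pw2 : List.Pairwise (· < ·)
      (((PySem.List.pyRange (start / 10) ((end_ + 9) / 10) 1).flatMap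
        (fun p => (PySem.List.pyRange 1 10 1).map (fun d => 10 * p + d))).filter
        (fun n => decide (start ≤ n) && decide (n < end_))) := pwflat.filter _
  refine List.Perm.eq_of_pairwise (fun a b _ _ hab hba => absurd hab (by omega)) pw1 pw2 ?_
  refine (List.perm_ext_iff_of_nodup (pw1.imp (fun hab => by omega)) (pw2.imp (fun hab => by omega))).2 ?_
  intro x
  simp only [List.mem_filter, PySem.List.mem_pyRange_one, List.mem_flatMap, List.mem_map,
    Bool.not_eq_eq_eq_not, Bool.not_true, decide_eq_false_iff_not, Bool.and_eq_true,
    decide_eq_true_eq]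
  constructor
  · rintro ⟨⟨hx1, hx2⟩, hnd⟩
    exact ⟨⟨x / 10, ⟨by omega, by omega⟩, x % 10, ⟨by omega, by omega⟩, by omega⟩, hx1, hx2⟩
  · rintro ⟨⟨p, hp, d, hd, rfl⟩, h1, h2⟩
    exact ⟨⟨h1, h2⟩, by omega⟩

theorem B_eq_zero_of_skip (start end_ : Int)
    (h : ∀ p d : Int, 1 ≤ d → d < 10 → pvPredB start end_ p d = false) :
    reversible_alt start end_ = 0 := by
  rw [B_sum]
  apply List.sum_eq_zero
  intro x hx
  rw [List.mem_map] at hx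
  obtain ⟨p, -, rfl⟩ := hx
  have hz : (PySem.List.pyRange 1 10 1).countP (pvPredB start end_ p) = 0 := by
    rw [List.countP_eq_zero]
    intro d hd
    have hdm := PySem.List.mem_pyRange_one.1 hd
    simp [h p d hdm.1 hdm.2]
  rw [hz]
  rfl

-- ===== VERDICT (by name: the statement is the Claim_ definition above) =====
theorem reversible_spec : Claim_equal_reversible := by
  intro start end_ _ hpre
  unfold Spec_reversible
  by_cases hs : 0 ≤ start
  · rw [A_countP start end_ hs, B_sum start end_]
    have hfd1 : PySem.Int.floordiv start 10 = start / 10 :=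
      PySem.Int.floordiv_eq_ediv_of_pos (by norm_num)
    have hfd2 : PySem.Int.floordiv (end_ + 9) 10 = (end_ + 9) / 10 :=
      PySem.Int.floordiv_eq_ediv_of_pos (by norm_num)
    have hsp : 0 ≤ start / 10 := by omega
    -- rewrite each block count through the per-element predicate identity
    have hmap : (PySem.List.pyRange (start / 10) ((end_ + 9) / 10) 1).map
          (fun p => (((PySem.List.pyRange 1 10 1).countP (pvPredB start end_ p) : Nat) : Int)) =
        (PySem.List.pyRange (start / 10) ((end_ + 9) / 10) 1).map
          (fun p => ((((PySem.List.pyRange 1 10 1).map (fun d => 10 * p + d)).countP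
            (fun n => pvGoodA n && (decide (start ≤ n) && decide (n < end_))) : Nat) : Int)) := by
      apply List.map_congr_left
      intro p hp
      have hp0 : 0 ≤ p := le_trans hsp (PySem.List.mem_pyRange_one.1 hp).1
      congr 1
      rw [List.countP_map]
      apply List.countP_congr
      intro d hd
      have hdm := PySem.List.mem_pyRange_one.1 hd
      rw [predB_eq start end_ p d hp0 hdm.1 hdm.2]
      exact Iff.rfl
    rw [hfd1, hfd2, hmap, sum_map_natCast]
    congr 1
    have hflat : ((PySem.List.pyRange (start / 10) ((end_ + 9) / 10) 1).map
        (fun p => ((PySem.List.pyRange 1 10 1).map (fun d => 10 * p + d)).countP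
          (fun n => pvGoodA n && (decide (start ≤ n) && decide (n < end_))))).sum =
        List.countP (fun n => pvGoodA n && (decide (start ≤ n) && decide (n < end_)))
          ((PySem.List.pyRange (start / 10) ((end_ + 9) / 10) 1).flatMap
            (fun p => (PySem.List.pyRange 1 10 1).map (fun d => 10 * p + d))) := by
      rw [List.countP_flatMap]
      apply congrArg List.sum
      apply List.map_congr_left
      intro p _
      rfl
    rw [hflat]
    symm
    calc List.countP (fun n => pvGoodA n && (decide (start ≤ n) && decide (n < end_)))
          ((PySem.List.pyRange (start / 10) ((end_ + 9) / 10) 1).flatMap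
            (fun p => (PySem.List.pyRange 1 10 1).map (fun d => 10 * p + d)))
        = List.countP pvGoodA
            (((PySem.List.pyRange (start / 10) ((end_ + 9) / 10) 1).flatMap
              (fun p => (PySem.List.pyRange 1 10 1).map (fun d => 10 * p + d))).filter
              (fun n => decide (start ≤ n) && decide (n < end_))) := by
          rw [List.countP_filter]
      _ = List.countP pvGoodA
            ((PySem.List.pyRange start end_ 1).filter (fun n => !decide ((10 : Int) ∣ n))) := by
          rw [← filter_block_eq start end_ hs]
      _ = List.countP pvGoodA (PySem.List.pyRange start end_ 1) := by
          rw [List.countP_filter]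
          apply List.countP_congr
          intro x _
          constructor
          · intro hx
            rw [Bool.and_eq_true] at hx
            exact hx.1
          · intro hx
            rw [Bool.and_eq_true]
            refine ⟨hx, ?_⟩
            simp only [pvGoodA, Bool.and_eq_true, Bool.not_eq_eq_eq_not, Bool.not_true,
              decide_eq_false_iff_not] at hx
            simp only [Bool.not_eq_eq_eq_not, Bool.not_true, decide_eq_false_iff_not]
            intro hdvd
            exact hx.1 ((PySem.Int.mod_eq_zero_iff_dvd x 10).2 hdvd)
  · have hA : reversible start end_ = 0 := by
      rcases hpre with h | h | ⟨h1, h2⟩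
      · omega
      · unfold reversible
        rw [PySem.List.pyRange_one_eq_nil h]
        rfl
      · unfold reversible
        subst h1
        rw [PySem.List.pyRange_one_singleton]
        simpa using bodyA_skip_neg 0 start (by omega) h2
    have hB : reversible_alt start end_ = 0 := by
      rcases hpre with h | h | ⟨h1, h2⟩
      · omega
      · apply B_eq_zero_of_skip
        intro p d hd1 hd9
        have hor : 10 * p + d < start ∨ end_ ≤ 10 * p + d := by omega
        simp [pvPredB, hor]
      · apply B_eq_zero_of_skip
        intro p d hd1 hd9
        have hor : 10 * p + d < start ∨ end_ ≤ 10 * p + d := by omega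
        simp [pvPredB, hor]
    rw [hA, hB]
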